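-- pv_equiv track=rewrite | github.com/srikanrk/aws-wa-sagemaker-mcp | awslabs/sagemaker_wa_mcp_server/report_generator.py | _resource_type_from_name
-- ===== SOURCE A (Python) =====
-- def _resource_type_from_name(name: str) -> tuple[str, str]:
--     """Extract resource type and clean name from a resource identifier.
--
--     Args:
--         name: Resource name, possibly prefixed with type (e.g., 'endpoint/my-ep')
--
--     Returns:
--         Tuple of (type_label, clean_name)
--     """
--     type_map = {
--         'endpoint': ('Endpoint', 'endpoints'),
--         'training_job': ('Training Job', 'jobs'),
--         'notebook': ('Notebook', 'notebook-instances'),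
--         'model': ('Model', 'models'),
--     }
--     for prefix, (label, _) in type_map.items():
--         if name.startswith(f'{prefix}/'):
--             return label, name[len(prefix) + 1 :]
--     return 'Resource', name
-- ===== SOURCE B (Python) =====
-- # Character-level trie/DFA walk: a flat transition table is built once from the
-- # prefix words, then the name is scanned a single character at a time; no
-- # per-prefix startswith test and no string comparison of the head part.
-- _TRANS = {}
-- _ACCEPT = {}
-- _n = 1
-- for _word, _label in [
--     ('endpoint', 'Endpoint'),
--     ('training_job', 'Training Job'),
--     ('notebook', 'Notebook'),
--     ('model', 'Model'),
-- ]: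
--     _s = 0
--     for _ch in _word:
--         _t = _TRANS.get((_s, _ch))
--         if _t is None:
--             _t = _n
--             _TRANS[(_s, _ch)] = _t
--             _n += 1
--         _s = _t
--     _ACCEPT[_s] = _label
--
--
-- def _resource_type_from_name(name: str) -> tuple[str, str]:
--     """Extract resource type and clean name from a resource identifier."""
--     s = 0
--     for i, ch in enumerate(name):
--         if ch == '/':
--             label = _ACCEPT.get(s)
--             if label is not None:
--                 return label, name[i + 1:]
--             break
--         t = _TRANS.get((s, ch))
--         if t is None:
--             break
--         s = t
--     return 'Resource', name
-- ===== Notes on version B (the rewrite author's own statement) =====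
-- stated objective: alternative
-- what changed: A tests name.startswith for each entry of the type map; B builds a flat trie/DFA transition table from the prefix words once at module level and resolves the name with a single character-by-character state walk, accepting when it reads the separator character in an accepting state.
import Mathlib
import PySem

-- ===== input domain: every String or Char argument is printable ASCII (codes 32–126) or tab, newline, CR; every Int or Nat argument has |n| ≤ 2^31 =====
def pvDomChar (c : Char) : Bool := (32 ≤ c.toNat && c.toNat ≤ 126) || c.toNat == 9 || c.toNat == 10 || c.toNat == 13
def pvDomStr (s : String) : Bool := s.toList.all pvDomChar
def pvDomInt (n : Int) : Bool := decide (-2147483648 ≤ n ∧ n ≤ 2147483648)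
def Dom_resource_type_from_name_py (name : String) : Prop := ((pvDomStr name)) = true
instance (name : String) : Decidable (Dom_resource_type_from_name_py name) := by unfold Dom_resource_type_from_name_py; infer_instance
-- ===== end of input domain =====

-- B replaces A's per-prefix startswith scan by a single character-level walk of a precomputed trie/DFA transition table (alternative algorithm; same behaviour).


set_option maxRecDepth 8192

-- ===== PORT A =====
def pvTypeMapA : PySem.Dict String (String × String) :=
  ((((PySem.Dict.empty).insert "endpoint" ("Endpoint", "endpoints")).insert
      "training_job" ("Training Job", "jobs")).insert
      "notebook" ("Notebook", "notebook-instances")).insert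
      "model" ("Model", "models")

-- A's for-loop with early return: scan the dict items in order
def pvScanA (name : String) : List (String × (String × String)) → Option (String × String)
  | [] => none
  | (p, lv) :: rest =>
      if PySem.Str.startswith name (p ++ "/") then
        some (lv.1, PySem.Str.slice name (some (PySem.Str.len p + 1)) none)
      else pvScanA name rest

def resource_type_from_name_py (name : String) : String × String :=
  (pvScanA name pvTypeMapA.items).getD ("Resource", name)

-- ===== PORT B =====
-- module-level build of Source B: the word list, and the loops filling _TRANS/_ACCEPT
def pvWords : List (String × String) :=
  [("endpoint", "Endpoint"), ("training_job", "Training Job"),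
   ("notebook", "Notebook"), ("model", "Model")]

def pvBuild : PySem.Dict (Int × Char) Int × PySem.Dict Int String :=
  let st := pvWords.foldl
    (fun (st : PySem.Dict (Int × Char) Int × PySem.Dict Int String × Int) wl =>
      let st2 := wl.1.toList.foldl
        (fun (st2 : Int × PySem.Dict (Int × Char) Int × Int) ch =>
          match PySem.Dict.get? st2.2.1 (st2.1, ch) with
          | some t => (t, st2.2.1, st2.2.2)
          | none => (st2.2.2, (st2.2.1).insert (st2.1, ch) st2.2.2, st2.2.2 + 1))
        (0, st.1, st.2.2)
      (st2.2.1, (st.2.1).insert st2.1 wl.2, st2.2.2))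
    (PySem.Dict.empty, PySem.Dict.empty, 1)
  (st.1, st.2.1)

def pvTrans : PySem.Dict (Int × Char) Int := pvBuild.1
def pvAccept : PySem.Dict Int String := pvBuild.2

-- Source B's scanning loop (for i, ch in enumerate(name): …; break → fall through to the default)
def pvWalk (name : String) : Int → Nat → List Char → String × String
  | _, _, [] => ("Resource", name)
  | s, i, c :: rest =>
      if c == '/' then
        match PySem.Dict.get? pvAccept s with
        | some label => (label, PySem.Str.slice name (some ((i : Int) + 1)) none)
        | none => ("Resource", name)
      else
        match PySem.Dict.get? pvTrans (s, c) with
        | none => ("Resource", name)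
        | some t => pvWalk name t (i + 1) rest

def resource_type_from_name_py_alt (name : String) : String × String :=
  pvWalk name 0 0 name.toList

-- ===== PRECONDITION & SPEC =====
def Spec_resource_type_from_name_py (name : String) (out : String × String) : Prop := out = resource_type_from_name_py_alt name
instance (name : String) (out : String × String) : Decidable (Spec_resource_type_from_name_py name out) := by unfold Spec_resource_type_from_name_py; infer_instance

-- ===== CLAIM (what is proved, stated in full; the proofs are below) =====
def Claim_equal_resource_type_from_name_py : Prop := ∀ (name : String), Dom_resource_type_from_name_py name → Spec_resource_type_from_name_py name (resource_type_from_name_py name)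

-- ===== LEMMAS AND PROOFS =====

-- the built tables, evaluated
theorem pvTrans_eq : pvTrans = PySem.Dict.mk
    [((0,'e'),1),((1,'n'),2),((2,'d'),3),((3,'p'),4),((4,'o'),5),((5,'i'),6),((6,'n'),7),((7,'t'),8),
     ((0,'t'),9),((9,'r'),10),((10,'a'),11),((11,'i'),12),((12,'n'),13),((13,'i'),14),((14,'n'),15),((15,'g'),16),((16,'_'),17),((17,'j'),18),((18,'o'),19),((19,'b'),20),
     ((0,'n'),21),((21,'o'),22),((22,'t'),23),((23,'e'),24),((24,'b'),25),((25,'o'),26),((26,'o'),27),((27,'k'),28),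
     ((0,'m'),29),((29,'o'),30),((30,'d'),31),((31,'e'),32),((32,'l'),33)] := by decide

-- a linear chain of the trie: the state s reads exactly the word w, then accepts lab
def ChainSpec (lab : String) : Int → List Char → Prop
  | s, [] => PySem.Dict.get? pvAccept s = some lab ∧ (∀ c : Char, PySem.Dict.get? pvTrans (s, c) = none)
  | s, a :: w => a ≠ '/' ∧ PySem.Dict.get? pvAccept s = none ∧
      ∃ t : Int, (∀ c : Char, PySem.Dict.get? pvTrans (s, c) = if a = c then some t else none) ∧
        ChainSpec lab t w

theorem pv_tr_1 (c : Char) : PySem.Dict.get? pvTrans ((1 : Int), c) = if 'n' = c then some 2 else none := by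
  rw [pvTrans_eq]; simp only [PySem.Dict.get?_mk_cons, beq_iff_eq, Prod.mk.injEq]; simp [PySem.Dict.get?]

theorem pv_tr_2 (c : Char) : PySem.Dict.get? pvTrans ((2 : Int), c) = if 'd' = c then some 3 else none := by
  rw [pvTrans_eq]; simp only [PySem.Dict.get?_mk_cons, beq_iff_eq, Prod.mk.injEq]; simp [PySem.Dict.get?]

theorem pv_tr_3 (c : Char) : PySem.Dict.get? pvTrans ((3 : Int), c) = if 'p' = c then some 4 else none := by
  rw [pvTrans_eq]; simp only [PySem.Dict.get?_mk_cons, beq_iff_eq, Prod.mk.injEq]; simp [PySem.Dict.get?]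

theorem pv_tr_4 (c : Char) : PySem.Dict.get? pvTrans ((4 : Int), c) = if 'o' = c then some 5 else none := by
  rw [pvTrans_eq]; simp only [PySem.Dict.get?_mk_cons, beq_iff_eq, Prod.mk.injEq]; simp [PySem.Dict.get?]

theorem pv_tr_5 (c : Char) : PySem.Dict.get? pvTrans ((5 : Int), c) = if 'i' = c then some 6 else none := by
  rw [pvTrans_eq]; simp only [PySem.Dict.get?_mk_cons, beq_iff_eq, Prod.mk.injEq]; simp [PySem.Dict.get?]

theorem pv_tr_6 (c : Char) : PySem.Dict.get? pvTrans ((6 : Int), c) = if 'n' = c then some 7 else none := by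
  rw [pvTrans_eq]; simp only [PySem.Dict.get?_mk_cons, beq_iff_eq, Prod.mk.injEq]; simp [PySem.Dict.get?]

theorem pv_tr_7 (c : Char) : PySem.Dict.get? pvTrans ((7 : Int), c) = if 't' = c then some 8 else none := by
  rw [pvTrans_eq]; simp only [PySem.Dict.get?_mk_cons, beq_iff_eq, Prod.mk.injEq]; simp [PySem.Dict.get?]

theorem pv_tr_8 (c : Char) : PySem.Dict.get? pvTrans ((8 : Int), c) = none := by
  rw [pvTrans_eq]; simp only [PySem.Dict.get?_mk_cons, beq_iff_eq, Prod.mk.injEq]; simp [PySem.Dict.get?]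

theorem pv_tr_9 (c : Char) : PySem.Dict.get? pvTrans ((9 : Int), c) = if 'r' = c then some 10 else none := by
  rw [pvTrans_eq]; simp only [PySem.Dict.get?_mk_cons, beq_iff_eq, Prod.mk.injEq]; simp [PySem.Dict.get?]

theorem pv_tr_10 (c : Char) : PySem.Dict.get? pvTrans ((10 : Int), c) = if 'a' = c then some 11 else none := by
  rw [pvTrans_eq]; simp only [PySem.Dict.get?_mk_cons, beq_iff_eq, Prod.mk.injEq]; simp [PySem.Dict.get?]

theorem pv_tr_11 (c : Char) : PySem.Dict.get? pvTrans ((11 : Int), c) = if 'i' = c then some 12 else none := by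
  rw [pvTrans_eq]; simp only [PySem.Dict.get?_mk_cons, beq_iff_eq, Prod.mk.injEq]; simp [PySem.Dict.get?]

theorem pv_tr_12 (c : Char) : PySem.Dict.get? pvTrans ((12 : Int), c) = if 'n' = c then some 13 else none := by
  rw [pvTrans_eq]; simp only [PySem.Dict.get?_mk_cons, beq_iff_eq, Prod.mk.injEq]; simp [PySem.Dict.get?]

theorem pv_tr_13 (c : Char) : PySem.Dict.get? pvTrans ((13 : Int), c) = if 'i' = c then some 14 else none := by
  rw [pvTrans_eq]; simp only [PySem.Dict.get?_mk_cons, beq_iff_eq, Prod.mk.injEq]; simp [PySem.Dict.get?]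

theorem pv_tr_14 (c : Char) : PySem.Dict.get? pvTrans ((14 : Int), c) = if 'n' = c then some 15 else none := by
  rw [pvTrans_eq]; simp only [PySem.Dict.get?_mk_cons, beq_iff_eq, Prod.mk.injEq]; simp [PySem.Dict.get?]

theorem pv_tr_15 (c : Char) : PySem.Dict.get? pvTrans ((15 : Int), c) = if 'g' = c then some 16 else none := by
  rw [pvTrans_eq]; simp only [PySem.Dict.get?_mk_cons, beq_iff_eq, Prod.mk.injEq]; simp [PySem.Dict.get?]

theorem pv_tr_16 (c : Char) : PySem.Dict.get? pvTrans ((16 : Int), c) = if '_' = c then some 17 else none := by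
  rw [pvTrans_eq]; simp only [PySem.Dict.get?_mk_cons, beq_iff_eq, Prod.mk.injEq]; simp [PySem.Dict.get?]

theorem pv_tr_17 (c : Char) : PySem.Dict.get? pvTrans ((17 : Int), c) = if 'j' = c then some 18 else none := by
  rw [pvTrans_eq]; simp only [PySem.Dict.get?_mk_cons, beq_iff_eq, Prod.mk.injEq]; simp [PySem.Dict.get?]

theorem pv_tr_18 (c : Char) : PySem.Dict.get? pvTrans ((18 : Int), c) = if 'o' = c then some 19 else none := by
  rw [pvTrans_eq]; simp only [PySem.Dict.get?_mk_cons, beq_iff_eq, Prod.mk.injEq]; simp [PySem.Dict.get?]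

theorem pv_tr_19 (c : Char) : PySem.Dict.get? pvTrans ((19 : Int), c) = if 'b' = c then some 20 else none := by
  rw [pvTrans_eq]; simp only [PySem.Dict.get?_mk_cons, beq_iff_eq, Prod.mk.injEq]; simp [PySem.Dict.get?]

theorem pv_tr_20 (c : Char) : PySem.Dict.get? pvTrans ((20 : Int), c) = none := by
  rw [pvTrans_eq]; simp only [PySem.Dict.get?_mk_cons, beq_iff_eq, Prod.mk.injEq]; simp [PySem.Dict.get?]

theorem pv_tr_21 (c : Char) : PySem.Dict.get? pvTrans ((21 : Int), c) = if 'o' = c then some 22 else none := by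
  rw [pvTrans_eq]; simp only [PySem.Dict.get?_mk_cons, beq_iff_eq, Prod.mk.injEq]; simp [PySem.Dict.get?]

theorem pv_tr_22 (c : Char) : PySem.Dict.get? pvTrans ((22 : Int), c) = if 't' = c then some 23 else none := by
  rw [pvTrans_eq]; simp only [PySem.Dict.get?_mk_cons, beq_iff_eq, Prod.mk.injEq]; simp [PySem.Dict.get?]

theorem pv_tr_23 (c : Char) : PySem.Dict.get? pvTrans ((23 : Int), c) = if 'e' = c then some 24 else none := by
  rw [pvTrans_eq]; simp only [PySem.Dict.get?_mk_cons, beq_iff_eq, Prod.mk.injEq]; simp [PySem.Dict.get?]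

theorem pv_tr_24 (c : Char) : PySem.Dict.get? pvTrans ((24 : Int), c) = if 'b' = c then some 25 else none := by
  rw [pvTrans_eq]; simp only [PySem.Dict.get?_mk_cons, beq_iff_eq, Prod.mk.injEq]; simp [PySem.Dict.get?]

theorem pv_tr_25 (c : Char) : PySem.Dict.get? pvTrans ((25 : Int), c) = if 'o' = c then some 26 else none := by
  rw [pvTrans_eq]; simp only [PySem.Dict.get?_mk_cons, beq_iff_eq, Prod.mk.injEq]; simp [PySem.Dict.get?]

theorem pv_tr_26 (c : Char) : PySem.Dict.get? pvTrans ((26 : Int), c) = if 'o' = c then some 27 else none := by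
  rw [pvTrans_eq]; simp only [PySem.Dict.get?_mk_cons, beq_iff_eq, Prod.mk.injEq]; simp [PySem.Dict.get?]

theorem pv_tr_27 (c : Char) : PySem.Dict.get? pvTrans ((27 : Int), c) = if 'k' = c then some 28 else none := by
  rw [pvTrans_eq]; simp only [PySem.Dict.get?_mk_cons, beq_iff_eq, Prod.mk.injEq]; simp [PySem.Dict.get?]

theorem pv_tr_28 (c : Char) : PySem.Dict.get? pvTrans ((28 : Int), c) = none := by
  rw [pvTrans_eq]; simp only [PySem.Dict.get?_mk_cons, beq_iff_eq, Prod.mk.injEq]; simp [PySem.Dict.get?]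

theorem pv_tr_29 (c : Char) : PySem.Dict.get? pvTrans ((29 : Int), c) = if 'o' = c then some 30 else none := by
  rw [pvTrans_eq]; simp only [PySem.Dict.get?_mk_cons, beq_iff_eq, Prod.mk.injEq]; simp [PySem.Dict.get?]

theorem pv_tr_30 (c : Char) : PySem.Dict.get? pvTrans ((30 : Int), c) = if 'd' = c then some 31 else none := by
  rw [pvTrans_eq]; simp only [PySem.Dict.get?_mk_cons, beq_iff_eq, Prod.mk.injEq]; simp [PySem.Dict.get?]

theorem pv_tr_31 (c : Char) : PySem.Dict.get? pvTrans ((31 : Int), c) = if 'e' = c then some 32 else none := by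
  rw [pvTrans_eq]; simp only [PySem.Dict.get?_mk_cons, beq_iff_eq, Prod.mk.injEq]; simp [PySem.Dict.get?]

theorem pv_tr_32 (c : Char) : PySem.Dict.get? pvTrans ((32 : Int), c) = if 'l' = c then some 33 else none := by
  rw [pvTrans_eq]; simp only [PySem.Dict.get?_mk_cons, beq_iff_eq, Prod.mk.injEq]; simp [PySem.Dict.get?]

theorem pv_tr_33 (c : Char) : PySem.Dict.get? pvTrans ((33 : Int), c) = none := by
  rw [pvTrans_eq]; simp only [PySem.Dict.get?_mk_cons, beq_iff_eq, Prod.mk.injEq]; simp [PySem.Dict.get?]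

theorem pv_tr_0 (c : Char) : PySem.Dict.get? pvTrans ((0 : Int), c) = if 'e' = c then some 1 else if 't' = c then some 9 else if 'n' = c then some 21 else if 'm' = c then some 29 else none := by
  rw [pvTrans_eq]; simp only [PySem.Dict.get?_mk_cons, beq_iff_eq, Prod.mk.injEq]; simp [PySem.Dict.get?]

theorem pv_cs_e : ChainSpec "Endpoint" 1 ['n', 'd', 'p', 'o', 'i', 'n', 't'] := by
  simp only [ChainSpec]; exact ⟨by decide, by decide, 2, pv_tr_1, by decide, by decide, 3, pv_tr_2, by decide, by decide, 4, pv_tr_3, by decide, by decide, 5, pv_tr_4, by decide, by decide, 6, pv_tr_5, by decide, by decide, 7, pv_tr_6, by decide, by decide, 8, pv_tr_7, by decide, pv_tr_8⟩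

theorem pv_cs_t : ChainSpec "Training Job" 9 ['r', 'a', 'i', 'n', 'i', 'n', 'g', '_', 'j', 'o', 'b'] := by
  simp only [ChainSpec]; exact ⟨by decide, by decide, 10, pv_tr_9, by decide, by decide, 11, pv_tr_10, by decide, by decide, 12, pv_tr_11, by decide, by decide, 13, pv_tr_12, by decide, by decide, 14, pv_tr_13, by decide, by decide, 15, pv_tr_14, by decide, by decide, 16, pv_tr_15, by decide, by decide, 17, pv_tr_16, by decide, by decide, 18, pv_tr_17, by decide, by decide, 19, pv_tr_18, by decide, by decide, 20, pv_tr_19, by decide, pv_tr_20⟩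

theorem pv_cs_n : ChainSpec "Notebook" 21 ['o', 't', 'e', 'b', 'o', 'o', 'k'] := by
  simp only [ChainSpec]; exact ⟨by decide, by decide, 22, pv_tr_21, by decide, by decide, 23, pv_tr_22, by decide, by decide, 24, pv_tr_23, by decide, by decide, 25, pv_tr_24, by decide, by decide, 26, pv_tr_25, by decide, by decide, 27, pv_tr_26, by decide, by decide, 28, pv_tr_27, by decide, pv_tr_28⟩

theorem pv_cs_m : ChainSpec "Model" 29 ['o', 'd', 'e', 'l'] := by
  simp only [ChainSpec]; exact ⟨by decide, by decide, 30, pv_tr_29, by decide, by decide, 31, pv_tr_30, by decide, by decide, 32, pv_tr_31, by decide, by decide, 33, pv_tr_32, by decide, pv_tr_33⟩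


-- walking from a chain state returns lab iff the rest of the word followed by '/' comes next
theorem pv_chain (name lab : String) : ∀ (w : List Char) (s : Int), ChainSpec lab s w →
    ∀ (cs : List Char) (i : Nat), pvWalk name s i cs =
      if (w ++ ['/']) <+: cs then
        (lab, PySem.Str.slice name (some ((i : Int) + (w.length : Int) + 1)) none)
      else ("Resource", name) := by
  intro w
  induction w with
  | nil =>
    intro s hs cs i
    simp only [ChainSpec] at hs
    obtain ⟨hacc, htr⟩ := hs
    cases cs with
    | nil => simp [pvWalk]
    | cons c rest =>
      by_cases hc : c = '/'
      · subst hc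
        simp [pvWalk, hacc]
      · have hb : (c == '/') = false := by simp [hc]
        have hcs : ('/' : Char) ≠ c := fun h => hc h.symm
        simp [pvWalk, hb, htr c, List.cons_prefix_cons, hcs]
  | cons a w ih =>
    intro s hs cs i
    simp only [ChainSpec] at hs
    obtain ⟨ha, hacc, t, htr, hrest⟩ := hs
    cases cs with
    | nil => simp [pvWalk]
    | cons c rest =>
      by_cases hc : c = '/'
      · subst hc
        simp [pvWalk, hacc, List.cons_prefix_cons, ha]
      · have hb : (c == '/') = false := by simp [hc]
        by_cases hca : a = c
        · subst hca
          have harith : ((i : Int) + 1) + (w.length : Int) + 1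
              = (i : Int) + ((w.length : Nat) + 1 : Nat) + 1 := by push_cast; ring
          simp only [pvWalk, hb, Bool.false_eq_true, if_false, htr a, if_true]
          rw [ih t hrest rest (i + 1)]
          simp [List.cons_prefix_cons, harith]
        · have htr' : PySem.Dict.get? pvTrans (s, c) = none := by
            rw [htr c, if_neg hca]
          simp [pvWalk, hb, htr', List.cons_prefix_cons, hca]

-- the root state: the walk resolves exactly one of the four prefixed forms
theorem pv_acc_0 : PySem.Dict.get? pvAccept (0 : Int) = none := by decide

theorem pv_root (name : String) (cs : List Char) (i : Nat) :
    pvWalk name 0 i cs =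
      if (['e','n','d','p','o','i','n','t','/'] <+: cs) then ("Endpoint", PySem.Str.slice name (some ((i : Int) + 9)) none)
      else if (['t','r','a','i','n','i','n','g','_','j','o','b','/'] <+: cs) then ("Training Job", PySem.Str.slice name (some ((i : Int) + 13)) none)
      else if (['n','o','t','e','b','o','o','k','/'] <+: cs) then ("Notebook", PySem.Str.slice name (some ((i : Int) + 9)) none)
      else if (['m','o','d','e','l','/'] <+: cs) then ("Model", PySem.Str.slice name (some ((i : Int) + 6)) none)
      else ("Resource", name) := by
  cases cs with
  | nil => simp [pvWalk]
  | cons c rest =>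
    by_cases hc : c = '/'
    · subst hc
      simp [pvWalk, pv_acc_0, List.cons_prefix_cons]
    · have hb : (c == '/') = false := by simp [hc]
      by_cases he : c = 'e'
      · subst he
        have hstep : PySem.Dict.get? pvTrans ((0 : Int), 'e') = some 1 := by rw [pv_tr_0]; simp
        simp only [pvWalk, hb, Bool.false_eq_true, if_false, hstep]
        rw [pv_chain name "Endpoint" ['n','d','p','o','i','n','t'] 1 pv_cs_e rest (i + 1)]
        simp [List.cons_prefix_cons]
        split_ifs with hp
        · congr 1
        · rfl
      · by_cases ht : c = 't'
        · subst ht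
          have hstep : PySem.Dict.get? pvTrans ((0 : Int), 't') = some 9 := by rw [pv_tr_0]; simp
          simp only [pvWalk, hb, Bool.false_eq_true, if_false, hstep]
          rw [pv_chain name "Training Job" ['r','a','i','n','i','n','g','_','j','o','b'] 9 pv_cs_t rest (i + 1)]
          simp [List.cons_prefix_cons]
          split_ifs with hp
          · congr 1
          · rfl
        · by_cases hn : c = 'n'
          · subst hn
            have hstep : PySem.Dict.get? pvTrans ((0 : Int), 'n') = some 21 := by rw [pv_tr_0]; simp
            simp only [pvWalk, hb, Bool.false_eq_true, if_false, hstep]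
            rw [pv_chain name "Notebook" ['o','t','e','b','o','o','k'] 21 pv_cs_n rest (i + 1)]
            simp [List.cons_prefix_cons]
            split_ifs with hp
            · congr 1
            · rfl
          · by_cases hm : c = 'm'
            · subst hm
              have hstep : PySem.Dict.get? pvTrans ((0 : Int), 'm') = some 29 := by rw [pv_tr_0]; simp
              simp only [pvWalk, hb, Bool.false_eq_true, if_false, hstep]
              rw [pv_chain name "Model" ['o','d','e','l'] 29 pv_cs_m rest (i + 1)]
              simp [List.cons_prefix_cons]
              split_ifs with hp
              · congr 1
              · rfl
            · have hne : ('e' : Char) ≠ c := fun h => he h.symm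
              have hnt : ('t' : Char) ≠ c := fun h => ht h.symm
              have hnn : ('n' : Char) ≠ c := fun h => hn h.symm
              have hnm : ('m' : Char) ≠ c := fun h => hm h.symm
              have htr' : PySem.Dict.get? pvTrans ((0 : Int), c) = none := by
                rw [pv_tr_0]; simp [hne, hnt, hnn, hnm]
              simp [pvWalk, hb, htr', List.cons_prefix_cons, hne, hnt, hnn, hnm]


-- ===== VERDICT (by name: the statement is the Claim_ definition above) =====
theorem resource_type_from_name_py_spec : Claim_equal_resource_type_from_name_py := by
  intro name _
  unfold Spec_resource_type_from_name_py
  have hitems : pvTypeMapA.items =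
      [("endpoint", ("Endpoint", "endpoints")), ("training_job", ("Training Job", "jobs")),
       ("notebook", ("Notebook", "notebook-instances")), ("model", ("Model", "models"))] := by decide
  have halt : resource_type_from_name_py_alt name = pvWalk name 0 0 name.toList := rfl
  rw [halt, pv_root]
  have hb1 : PySem.Str.startswith name ("endpoint" ++ "/") = true ↔ (['e','n','d','p','o','i','n','t','/'] <+: name.toList) := by
    rw [PySem.Str.startswith_eq, PySem.Chars.startswith_iff]; exact Iff.rfl
  have hb2 : PySem.Str.startswith name ("training_job" ++ "/") = true ↔ (['t','r','a','i','n','i','n','g','_','j','o','b','/'] <+: name.toList) := by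
    rw [PySem.Str.startswith_eq, PySem.Chars.startswith_iff]; exact Iff.rfl
  have hb3 : PySem.Str.startswith name ("notebook" ++ "/") = true ↔ (['n','o','t','e','b','o','o','k','/'] <+: name.toList) := by
    rw [PySem.Str.startswith_eq, PySem.Chars.startswith_iff]; exact Iff.rfl
  have hb4 : PySem.Str.startswith name ("model" ++ "/") = true ↔ (['m','o','d','e','l','/'] <+: name.toList) := by
    rw [PySem.Str.startswith_eq, PySem.Chars.startswith_iff]; exact Iff.rfl
  by_cases h1 : ['e','n','d','p','o','i','n','t','/'] <+: name.toList
  · simp only [resource_type_from_name_py, hitems, pvScanA, hb1.mpr h1, if_true, if_pos h1]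
    simp [PySem.Str.len]
  by_cases h2 : ['t','r','a','i','n','i','n','g','_','j','o','b','/'] <+: name.toList
  · have hs1 : ¬ PySem.Str.startswith name ("endpoint" ++ "/") = true := fun hh => h1 (hb1.mp hh)
    simp only [resource_type_from_name_py, hitems, pvScanA, hs1, hb2.mpr h2, if_true,
      if_neg h1, if_pos h2]
    simp [PySem.Str.len]
  by_cases h3 : ['n','o','t','e','b','o','o','k','/'] <+: name.toList
  · have hs1 : ¬ PySem.Str.startswith name ("endpoint" ++ "/") = true := fun hh => h1 (hb1.mp hh)
    have hs2 : ¬ PySem.Str.startswith name ("training_job" ++ "/") = true := fun hh => h2 (hb2.mp hh)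
    simp only [resource_type_from_name_py, hitems, pvScanA, hs1, hs2, hb3.mpr h3, if_true,
      if_neg h1, if_neg h2, if_pos h3]
    simp [PySem.Str.len]
  by_cases h4 : ['m','o','d','e','l','/'] <+: name.toList
  · have hs1 : ¬ PySem.Str.startswith name ("endpoint" ++ "/") = true := fun hh => h1 (hb1.mp hh)
    have hs2 : ¬ PySem.Str.startswith name ("training_job" ++ "/") = true := fun hh => h2 (hb2.mp hh)
    have hs3 : ¬ PySem.Str.startswith name ("notebook" ++ "/") = true := fun hh => h3 (hb3.mp hh)
    simp only [resource_type_from_name_py, hitems, pvScanA, hs1, hs2, hs3, hb4.mpr h4, if_true,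
      if_neg h1, if_neg h2, if_neg h3, if_pos h4]
    simp [PySem.Str.len]
  · have hs1 : ¬ PySem.Str.startswith name ("endpoint" ++ "/") = true := fun hh => h1 (hb1.mp hh)
    have hs2 : ¬ PySem.Str.startswith name ("training_job" ++ "/") = true := fun hh => h2 (hb2.mp hh)
    have hs3 : ¬ PySem.Str.startswith name ("notebook" ++ "/") = true := fun hh => h3 (hb3.mp hh)
    have hs4 : ¬ PySem.Str.startswith name ("model" ++ "/") = true := fun hh => h4 (hb4.mp hh)
    simp only [resource_type_from_name_py, hitems, pvScanA, hs1, hs2, hs3, hs4,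
      if_neg h1, if_neg h2, if_neg h3, if_neg h4]
    simp
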